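-- pv_equiv track=rewrite | github.com/seba1288/pp1 | 04-Subroutines/task/task45.py | f
-- ===== SOURCE A (Python) =====
-- def f(expression):
--     suma = int(expression[0])
--
--     counter = 0
--     for i in expression[1:]:
--         if i != '+' and i != '-':
--
--             if expression[counter] == '+':
--                 suma += int(i)
--             elif expression[counter ] == '-':
--                 suma -= int(i)
--         counter += 1
--
--
--     return suma
-- ===== SOURCE B (Python) =====
-- def f(expression):
--     # Staged decomposition: take the leading operand, then sum the positive
--     # contributions and the negative contributions separately over adjacent
--     # (operator, operand) pairs; correct because addition commutes.
--     base = int(expression[0])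
--     pairs = list(zip(expression, expression[1:]))
--     plus = sum(int(ch) for op, ch in pairs if op == '+' and ch not in '+-')
--     minus = sum(int(ch) for op, ch in pairs if op == '-' and ch not in '+-')
--     return base + plus - minus
-- ===== Notes on version B (the rewrite author's own statement) =====
-- stated objective: alternative
-- what changed: Replaces A's single imperative pass with a signed accumulator and a backward-peeking counter by a staged decomposition: zip the string with its tail into (operator, operand) pairs, sum the '+' contributions and the '-' contributions in two separate comprehensions, and combine base + plus - minus (correct because integer addition commutes).
import Mathlib
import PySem

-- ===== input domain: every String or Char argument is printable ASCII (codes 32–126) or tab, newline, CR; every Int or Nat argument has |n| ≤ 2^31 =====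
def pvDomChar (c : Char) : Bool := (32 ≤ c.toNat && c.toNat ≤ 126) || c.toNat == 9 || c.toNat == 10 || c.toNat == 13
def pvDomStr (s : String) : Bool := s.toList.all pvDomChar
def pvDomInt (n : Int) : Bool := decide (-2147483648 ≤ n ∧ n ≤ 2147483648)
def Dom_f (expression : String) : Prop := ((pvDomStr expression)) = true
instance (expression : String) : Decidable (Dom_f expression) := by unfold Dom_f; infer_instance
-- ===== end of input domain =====

-- B replaces A's single imperative pass (signed accumulator + backward-peeking counter)
-- by a staged decomposition: zip into (operator, operand) pairs, sum the '+' and the '-'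
-- contributions in two separate comprehensions, combine base + plus - minus
-- (objective: alternative; correct because integer addition commutes).

-- int(<single-char string>), shared by both ports (exact: PySem.Int.ofChars?; the
-- .getD 0 default is only reached outside Pre_f, where the Pythons raise ValueError)
def chInt (c : Char) : Int := (PySem.Int.ofChars? [c]).getD 0

-- ===== PORT A =====
-- A's for-loop over expression[1:] with the running 'counter' into the full string
def fLoopA (cs : List Char) (rest : List Char) (counter : Nat) (suma : Int) : Int :=
  match rest with
  | [] => suma
  | i :: r =>
      let suma' :=
        if i ≠ '+' ∧ i ≠ '-' then
          if cs.getD counter ' ' = '+' then suma + chInt i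
          else if cs.getD counter ' ' = '-' then suma - chInt i
          else suma
        else suma
      fLoopA cs r (counter + 1) suma'

def f (expression : String) : Int :=
  let cs := expression.toList
  fLoopA cs (cs.drop 1) 0 (chInt (cs.headD ' '))

-- ===== PORT B =====
-- ch not in '+-'
def notOp (c : Char) : Bool := !(c == '+' || c == '-')

-- sum(int(ch) for op, ch in pairs if op == '+' and ch not in '+-')
def plusSum (ps : List (Char × Char)) : Int :=
  ((ps.filter (fun pc => pc.1 == '+' && notOp pc.2)).map (fun pc => chInt pc.2)).sum

-- sum(int(ch) for op, ch in pairs if op == '-' and ch not in '+-')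
def minusSum (ps : List (Char × Char)) : Int :=
  ((ps.filter (fun pc => pc.1 == '-' && notOp pc.2)).map (fun pc => chInt pc.2)).sum

def f_alt (expression : String) : Int :=
  let cs := expression.toList
  let pairs := cs.zip (cs.drop 1)          -- zip(expression, expression[1:])
  chInt (cs.headD ' ') + plusSum pairs - minusSum pairs

-- ===== PRECONDITION & SPEC =====
-- Pre_f = exactly where the Python A returns: nonempty, first char a digit (else
-- int(expression[0]) raises ValueError/IndexError), and every character that follows a
-- '+'/'-' and is not itself '+'/'-' is a digit (else int(i) raises ValueError).
def Pre_f (expression : String) : Prop :=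
  expression.toList ≠ [] ∧ (expression.toList.headD ' ').isDigit = true ∧
  ∀ k ∈ List.range expression.toList.length,
    (expression.toList.getD k ' ' = '+' ∨ expression.toList.getD k ' ' = '-') →
    ¬(expression.toList.getD (k + 1) ' ' = '+' ∨ expression.toList.getD (k + 1) ' ' = '-') →
    k + 1 < expression.toList.length →
    (expression.toList.getD (k + 1) ' ').isDigit = true
instance (expression : String) : Decidable (Pre_f expression) := by unfold Pre_f; infer_instance
def pvWitness_f : String := "1+2-3"

def Spec_f (expression : String) (out : Int) : Prop := out = f_alt expression
instance (expression : String) (out : Int) : Decidable (Spec_f expression out) := by unfold Spec_f; infer_instance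

-- ===== CLAIM (what is proved, stated in full; the proofs are below) =====
def Claim_equal_f : Prop := ∀ (expression : String), Dom_f expression → Pre_f expression → Spec_f expression (f expression)

-- ===== LEMMAS AND PROOFS =====

lemma plusSum_cons (p c : Char) (t : List (Char × Char)) :
    plusSum ((p, c) :: t) = (if p = '+' ∧ notOp c = true then chInt c else 0) + plusSum t := by
  by_cases h : p = '+' ∧ notOp c = true
  · simp [plusSum, h]
  · simp only [plusSum, List.filter_cons]
    rw [if_neg h]
    have : (p == '+' && notOp c) = false := by
      rcases Bool.eq_false_or_eq_true (notOp c) with hn | hn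
      · have : ¬ p = '+' := fun hp => h ⟨hp, hn⟩
        simp [this]
      · simp [hn]
    simp [this]

lemma minusSum_cons (p c : Char) (t : List (Char × Char)) :
    minusSum ((p, c) :: t) = (if p = '-' ∧ notOp c = true then chInt c else 0) + minusSum t := by
  by_cases h : p = '-' ∧ notOp c = true
  · simp [minusSum, h]
  · simp only [minusSum, List.filter_cons]
    rw [if_neg h]
    have : (p == '-' && notOp c) = false := by
      rcases Bool.eq_false_or_eq_true (notOp c) with hn | hn
      · have : ¬ p = '-' := fun hp => h ⟨hp, hn⟩
        simp [this]
      · simp [hn]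
    simp [this]

-- main invariant: A's loop from position counter+1 equals suma plus the staged sums
-- over the remaining (operator, operand) pairs
lemma loop_eq (cs : List Char) :
    ∀ (rest : List Char) (counter : Nat) (suma : Int), rest = cs.drop (counter + 1) →
      fLoopA cs rest counter suma
        = suma + plusSum ((cs.drop counter).zip rest) - minusSum ((cs.drop counter).zip rest) := by
  intro rest
  induction rest with
  | nil =>
    intro counter suma _
    simp [fLoopA, plusSum, minusSum]
  | cons i r ih =>
    intro counter suma h
    have hlt : counter < cs.length := by
      by_contra hge
      rw [List.drop_eq_nil_of_le (by omega)] at h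
      exact List.cons_ne_nil i r h
    have hdropc : cs.drop counter = cs[counter] :: cs.drop (counter + 1) :=
      List.drop_eq_getElem_cons hlt
    have hr : r = cs.drop (counter + 1 + 1) := by
      have := congrArg List.tail h
      simpa [List.tail_drop] using this
    have hzip : (cs.drop counter).zip (i :: r)
        = (cs[counter], i) :: ((cs.drop (counter + 1)).zip r) := by
      rw [hdropc, ← h]
      rfl
    have hgd : cs.getD counter ' ' = cs[counter] := by
      simp [List.getD_eq_getElem?_getD, List.getElem?_eq_getElem hlt]
    rw [fLoopA, hzip, plusSum_cons, minusSum_cons, ih (counter + 1) _ hr, ← h, hgd]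
    set p := cs[counter]
    by_cases hop : i ≠ '+' ∧ i ≠ '-'
    · have hno : notOp i = true := by simp [notOp, hop.1, hop.2]
      rw [if_pos hop]
      by_cases hp1 : p = '+'
      · rw [if_pos hp1, if_pos ⟨hp1, hno⟩, if_neg (by simp [hp1])]
        ring
      · by_cases hp2 : p = '-'
        · rw [if_neg hp1, if_pos hp2, if_neg (fun hc => hp1 hc.1), if_pos ⟨hp2, hno⟩]
          ring
        · rw [if_neg hp1, if_neg hp2, if_neg (fun hc => hp1 hc.1), if_neg (fun hc => hp2 hc.1)]
          ring
    · have hno : notOp i = false := by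
        rcases not_and_or.mp hop with hh | hh
        · simp [notOp, not_not.mp hh]
        · simp [notOp, not_not.mp hh]
      rw [if_neg hop, if_neg (by simp [hno]), if_neg (by simp [hno])]
      ring

-- ===== VERDICT (by name: the statement is the Claim_ definition above) =====
theorem f_spec : Claim_equal_f := by
  intro expression _ _
  unfold Spec_f f f_alt
  have h := loop_eq expression.toList (expression.toList.drop 1) 0
    (chInt (expression.toList.headD ' ')) (by simp)
  simpa using h
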